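-- pv_equiv track=rewrite | github.com/Realrandombacon/genoresearch | tools/blast.py | _summarize_remote
-- ===== SOURCE A (Python) =====
-- def _summarize_remote(raw_text: str, max_hits: int) -> str:
--     """Extract key info from BLAST text output."""
--     lines = raw_text.split("\n")
--     summary_lines = []
--     in_descriptions = False
--     hit_count = 0
--
--     for line in lines:
--         if "Sequences producing significant alignments" in line:
--             in_descriptions = True
--             summary_lines.append("=== BLAST Hits (remote NCBI) ===")
--             continue
--         if in_descriptions and line.strip() and hit_count < max_hits:
--             if line.startswith(">") or line.startswith(" "):
--                 summary_lines.append(line.rstrip()[:200])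
--                 hit_count += 1
--             if line.strip() == "":
--                 in_descriptions = False
--
--         if "No significant similarity found" in line:
--             return "BLAST (remote): No significant similarity found."
--
--     if not summary_lines:
--         meaningful = [l for l in lines if l.strip() and not l.startswith("<!")]
--         return "BLAST results (raw):\n" + "\n".join(meaningful[:20])
--
--     return "\n".join(summary_lines)
-- ===== SOURCE B (Python) =====
-- def _summarize_remote(raw_text: str, max_hits: int) -> str:
--     """Extract key info from BLAST text output."""
--     lines = raw_text.split("\n")
--
--     if any("No significant similarity found" in line for line in lines):
--         return "BLAST (remote): No significant similarity found."
--
--     for i, line in enumerate(lines):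
--         if "Sequences producing significant alignments" in line:
--             hits = []
--             for l in lines[i + 1:]:
--                 if len(hits) >= max_hits:
--                     break
--                 if l.strip() and (l.startswith(">") or l.startswith(" ")):
--                     hits.append(l.rstrip()[:200])
--             return "\n".join(["=== BLAST Hits (remote NCBI) ==="] + hits)
--
--     meaningful = [l for l in lines if l.strip() and not l.startswith("<!")]
--     return "BLAST results (raw):\n" + "\n".join(meaningful[:20])
-- ===== Notes on version B (the rewrite author's own statement) =====
-- stated objective: simpler
-- what changed: A's single stateful pass with an in_descriptions flag, a per-line early return and a hit counter is replaced by a whole-text no-similarity pre-check, then a scan anchored at the first header line collecting hits until max_hits (A's flag state machine disappears).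
-- intended difference: On inputs with two or more header lines, or whose only no-similarity text sits on a header line, A returns duplicated banners resp. misses the no-similarity early return; B returns a single banner resp. the no-similarity message, which is the intended summary. — e.g. on _summarize_remote("Sequences producing significant alignments\nSequences producing significant alignments", 5): A returns "=== BLAST Hits (remote NCBI) ===\n=== BLAST Hits (remote NCBI) ===", B returns "=== BLAST Hits (remote NCBI) ==="
import Mathlib
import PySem

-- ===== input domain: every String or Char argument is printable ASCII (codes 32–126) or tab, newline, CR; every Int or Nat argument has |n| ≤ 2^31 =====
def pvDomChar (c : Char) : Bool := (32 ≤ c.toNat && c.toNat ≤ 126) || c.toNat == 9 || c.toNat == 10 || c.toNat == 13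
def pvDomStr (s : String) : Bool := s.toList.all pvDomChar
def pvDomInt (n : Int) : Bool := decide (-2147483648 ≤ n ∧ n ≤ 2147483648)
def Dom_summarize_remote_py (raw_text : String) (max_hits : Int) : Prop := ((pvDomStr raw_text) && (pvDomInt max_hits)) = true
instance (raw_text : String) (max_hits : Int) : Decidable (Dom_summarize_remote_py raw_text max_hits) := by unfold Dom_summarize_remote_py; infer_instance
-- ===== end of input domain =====

-- B replaces A's single stateful flag-driven pass by a no-similarity pre-check plus a
-- header-anchored scan of the lines after the first banner line (objective: simpler decomposition);
-- on the exceptional inputs in D_ (repeated header lines, or a header line that itself contains the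
-- no-similarity text) A's duplicate banner / skipped check is accidental and B returns the intended value.


-- shared string literals of the Python module
def pvHDR : String := "Sequences producing significant alignments"
def pvNOSIG : String := "No significant similarity found"
def pvBanner : String := "=== BLAST Hits (remote NCBI) ==="
def pvMsg : String := "BLAST (remote): No significant similarity found."
-- line.rstrip()[:200]
def pvTrunc (l : String) : String := PySem.Str.slice (PySem.Str.rstrip l) none (some 200)
-- the raw fallback 'BLAST results (raw):\n' + '\n'.join(meaningful[:20]) (identical code in A and B)
def pvFallback (lines : List String) : String :=
  "BLAST results (raw):\n" ++
    PySem.Str.join "\n"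
      (PySem.List.slice (lines.filter (fun l => !(PySem.Str.strip l == "") && !(PySem.Str.startswith l "<!"))) none (some 20))

-- lines = raw_text.split("\n"); the two substring tests both programs make on a line
def pvLines (s : String) : List String := (PySem.Str.split? s "\n").getD []
def pvIsHdr (l : String) : Bool := PySem.Str.isIn pvHDR l
def pvIsNoSig (l : String) : Bool := PySem.Str.isIn pvNOSIG l

-- ===== PORT A =====
-- A's for-loop with state (summary_lines, in_descriptions, hit_count); early 'return' = stop recursing.
-- (the inner 'if line.strip() == ""' of A is unreachable — its guard requires line.strip() truthy — and is omitted)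
def pvLoopA (allLines : List String) (mh : Int) : List String → List String → Bool → Int → String
  | [], summary, _, _ =>
      if summary = [] then pvFallback allLines else PySem.Str.join "\n" summary
  | l :: rest, summary, inDesc, hits =>
      if pvIsHdr l then
        pvLoopA allLines mh rest (summary ++ [pvBanner]) true hits
      else
        let st :=
          if inDesc && !(PySem.Str.strip l == "") && decide (hits < mh) &&
              (PySem.Str.startswith l ">" || PySem.Str.startswith l " ") then
            (summary ++ [pvTrunc l], hits + 1)
          else (summary, hits)
        if pvIsNoSig l then pvMsg
        else pvLoopA allLines mh rest st.1 inDesc st.2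

def summarize_remote_py (raw_text : String) (max_hits : Int) : String :=
  let lines := pvLines raw_text
  pvLoopA lines max_hits lines [] false 0

-- ===== PORT B =====
-- Source B's 'for i, line in enumerate(lines): if HDR in line: … lines[i+1:] …' — find the lines after the first header
def pvFindHdr : List String → Option (List String)
  | [] => none
  | l :: rest => if pvIsHdr l then some rest else pvFindHdr rest

-- Source B's inner loop collecting 'hits' (break once len(hits) >= max_hits)
def pvEmitB (mh : Int) : List String → List String → List String
  | [], hits => hits
  | l :: rest, hits =>
      if decide ((hits.length : Int) ≥ mh) then hits
      else if !(PySem.Str.strip l == "") &&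
          (PySem.Str.startswith l ">" || PySem.Str.startswith l " ") then
        pvEmitB mh rest (hits ++ [pvTrunc l])
      else pvEmitB mh rest hits

def summarize_remote_py_alt (raw_text : String) (max_hits : Int) : String :=
  let lines := pvLines raw_text
  if lines.any (fun l => pvIsNoSig l) then pvMsg
  else
    match pvFindHdr lines with
    | none => pvFallback lines
    | some rest => PySem.Str.join "\n" (pvBanner :: pvEmitB max_hits rest [])

-- ===== PRECONDITION & SPEC =====
-- On inputs whose lines contain the summary header at least twice, or contain the no-similarity text only
-- on a header line, A accidentally emits the banner once per header line (without counting a hit) resp.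
-- skips the no-similarity check on that line; B returns a single banner resp. the no-similarity message,
-- which is the intended value.
def D_summarize_remote_py (raw_text : String) (max_hits : Int) : Prop :=
  (∀ l ∈ pvLines raw_text, pvIsNoSig l = true → pvIsHdr l = true) ∧
  ((∃ l ∈ pvLines raw_text, pvIsNoSig l = true) ∨
    2 ≤ (pvLines raw_text).countP (fun l => pvIsHdr l))
instance (raw_text : String) (max_hits : Int) : Decidable (D_summarize_remote_py raw_text max_hits) := by unfold D_summarize_remote_py; infer_instance

def Spec_summarize_remote_py (raw_text : String) (max_hits : Int) (out : String) : Prop := ¬ D_summarize_remote_py raw_text max_hits → out = summarize_remote_py_alt raw_text max_hits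
instance (raw_text : String) (max_hits : Int) (out : String) : Decidable (Spec_summarize_remote_py raw_text max_hits out) := by unfold Spec_summarize_remote_py; infer_instance

def pvDiffWitness_summarize_remote_py : String × Int :=
  ("Sequences producing significant alignments\nSequences producing significant alignments", 5)
def pvDiffWitnessOut_summarize_remote_py : String × String :=
  ("=== BLAST Hits (remote NCBI) ===\n=== BLAST Hits (remote NCBI) ===", "=== BLAST Hits (remote NCBI) ===")

-- ===== CLAIM (what is proved, stated in full; the proofs are below) =====
def Claim_unchanged_summarize_remote_py : Prop := ∀ (raw_text : String) (max_hits : Int), Dom_summarize_remote_py raw_text max_hits → Spec_summarize_remote_py raw_text max_hits (summarize_remote_py raw_text max_hits)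
def Claim_changed_summarize_remote_py : Prop := Dom_summarize_remote_py (pvDiffWitness_summarize_remote_py.1) (pvDiffWitness_summarize_remote_py.2) ∧ D_summarize_remote_py (pvDiffWitness_summarize_remote_py.1) (pvDiffWitness_summarize_remote_py.2) ∧ summarize_remote_py (pvDiffWitness_summarize_remote_py.1) (pvDiffWitness_summarize_remote_py.2) = pvDiffWitnessOut_summarize_remote_py.1 ∧ summarize_remote_py_alt (pvDiffWitness_summarize_remote_py.1) (pvDiffWitness_summarize_remote_py.2) = pvDiffWitnessOut_summarize_remote_py.2 ∧ pvDiffWitnessOut_summarize_remote_py.1 ≠ pvDiffWitnessOut_summarize_remote_py.2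

def Claim_exact_summarize_remote_py : Prop := ∀ (raw_text : String) (max_hits : Int), Dom_summarize_remote_py raw_text max_hits → D_summarize_remote_py raw_text max_hits → summarize_remote_py raw_text max_hits ≠ summarize_remote_py_alt raw_text max_hits

-- ===== LEMMAS AND PROOFS =====

-- A's hit condition with in_descriptions = true is B's hit condition (same atoms, reordered)
theorem pvCondComm (a b c : Bool) : (true && a && b && c) = (b && (a && c)) := by
  cases a <;> cases b <;> cases c <;> rfl

-- a line with the no-similarity text but no header forces A's early return, whatever the loop state
theorem pvLoopA_nosig (al : List String) (mh : Int) :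
    ∀ (ls summary : List String) (inDesc : Bool) (hits : Int),
      ls.any (fun l => pvIsNoSig l && !(pvIsHdr l)) = true →
      pvLoopA al mh ls summary inDesc hits = pvMsg := by
  intro ls
  induction ls with
  | nil => simp
  | cons l rest ih =>
    intro summary inDesc hits h
    simp only [List.any_cons, Bool.or_eq_true, Bool.and_eq_true, Bool.not_eq_true'] at h
    by_cases hh : pvIsHdr l = true
    · simp only [pvLoopA, hh, if_true]
      apply ih
      rcases h with ⟨_, hnh⟩ | h
      · rw [hh] at hnh; cases hnh
      · simpa using h
    · by_cases hn : pvIsNoSig l = true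
      · simp only [pvLoopA, hh, if_false, Bool.false_eq_true, hn, if_true]
      · simp only [pvLoopA, hh, if_false, Bool.false_eq_true, hn]
        apply ih
        rcases h with ⟨hn', _⟩ | h
        · exact absurd hn' hn
        · simpa using h

-- once max_hits is reached, B's inner loop adds nothing
theorem pvEmitB_stop (mh : Int) :
    ∀ (ls hits : List String), (hits.length : Int) ≥ mh → pvEmitB mh ls hits = hits := by
  intro ls
  induction ls with
  | nil => intro hits _; rfl
  | cons l rest ih =>
    intro hits h
    simp only [pvEmitB, decide_eq_true h, if_true]

-- after the (single) header line, A's loop extends the banner by exactly B's hit list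
theorem pvLoopA_emit (al : List String) (mh : Int) :
    ∀ (ls acc : List String),
      ls.any (fun l => pvIsHdr l) = false →
      ls.any (fun l => pvIsNoSig l) = false →
      pvLoopA al mh ls (pvBanner :: acc) true (acc.length : Int) =
        PySem.Str.join "\n" (pvBanner :: pvEmitB mh ls acc) := by
  intro ls
  induction ls with
  | nil => intro acc _ _; simp [pvLoopA, pvEmitB]
  | cons l rest ih =>
    intro acc h hn
    simp only [List.any_cons, Bool.or_eq_false_iff] at h hn
    obtain ⟨h1, h2⟩ := h
    obtain ⟨hn1, hn2⟩ := hn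
    simp only [pvLoopA, pvEmitB, h1, Bool.false_eq_true, if_false, hn1,
      pvCondComm (!(PySem.Str.strip l == "")) (decide ((acc.length : Int) < mh))
        (PySem.Str.startswith l ">" || PySem.Str.startswith l " ")]
    by_cases hge : ((acc.length : Int) ≥ mh)
    · have hlt : decide ((acc.length : Int) < mh) = false := by
        simp only [decide_eq_false_iff_not]; omega
      simp only [decide_eq_true hge, if_true, hlt, Bool.false_and,
        Bool.false_eq_true, if_false]
      rw [ih acc h2 hn2, pvEmitB_stop mh rest acc hge]
    · have hlt : decide ((acc.length : Int) < mh) = true := by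
        simp only [decide_eq_true_eq]; omega
      have hge' : decide ((acc.length : Int) ≥ mh) = false := by
        simp only [decide_eq_false_iff_not]; omega
      simp only [hge', Bool.false_eq_true, if_false, hlt]
      by_cases hc : (!(PySem.Str.strip l == "") &&
          (PySem.Str.startswith l ">" || PySem.Str.startswith l " ")) = true
      · simp only [hc, if_true]
        have := ih (acc ++ [pvTrunc l]) h2 hn2
        simpa [List.length_append, Int.natCast_add] using this
      · simp only [hc, Bool.false_eq_true, if_false]
        exact ih acc h2 hn2

-- before the first header line A's loop is inert, and the two sides decompose identically
theorem pvLoopA_main (al : List String) (mh : Int) :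
    ∀ (ls : List String),
      ls.any (fun l => pvIsNoSig l) = false →
      ls.countP (fun l => pvIsHdr l) ≤ 1 →
      pvLoopA al mh ls [] false 0 =
        (match pvFindHdr ls with
         | none => pvFallback al
         | some rest => PySem.Str.join "\n" (pvBanner :: pvEmitB mh rest [])) := by
  intro ls
  induction ls with
  | nil => intro _ _; simp [pvLoopA, pvFindHdr]
  | cons l rest ih =>
    intro hn hc
    simp only [List.any_cons, Bool.or_eq_false_iff] at hn
    obtain ⟨hn1, hn2⟩ := hn
    by_cases hh : pvIsHdr l = true
    · simp only [pvLoopA, pvFindHdr, hh, if_true, List.nil_append]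
      have hc0 : rest.countP (fun l => pvIsHdr l) = 0 := by
        rw [List.countP_cons] at hc; simp only [hh, if_true] at hc; omega
      have hnh : rest.any (fun l => pvIsHdr l) = false := by
        rw [Bool.eq_false_iff]
        intro hx
        rw [List.any_eq_true] at hx
        obtain ⟨x, hx1, hx2⟩ := hx
        rw [List.countP_eq_zero] at hc0
        exact hc0 x hx1 hx2
      have := pvLoopA_emit al mh rest [] hnh hn2
      simpa using this
    · have hc' : rest.countP (fun l => pvIsHdr l) ≤ 1 := by
        rw [List.countP_cons] at hc; omega
      simp only [pvLoopA, pvFindHdr, hh, if_false, Bool.false_eq_true, hn1, Bool.false_and]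
      exact ih hn2 hc'

-- ===== VERDICT (by name: the statements are the Claim_ definitions above) =====
theorem summarize_remote_py_spec : Claim_unchanged_summarize_remote_py := by
  intro raw_text max_hits _ hd
  unfold D_summarize_remote_py at hd
  simp only [summarize_remote_py, summarize_remote_py_alt]
  by_cases hpure : (pvLines raw_text).any (fun l => pvIsNoSig l && !(pvIsHdr l)) = true
  · rw [pvLoopA_nosig _ max_hits _ [] false 0 hpure]
    have hns : (pvLines raw_text).any (fun l => pvIsNoSig l) = true := by
      rw [List.any_eq_true] at hpure ⊢
      obtain ⟨x, hx1, hx2⟩ := hpure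
      rw [Bool.and_eq_true] at hx2
      exact ⟨x, hx1, hx2.1⟩
    rw [if_pos hns]
  · rw [Bool.not_eq_true, List.any_eq_false] at hpure
    have hA : ∀ l ∈ pvLines raw_text, pvIsNoSig l = true → pvIsHdr l = true := by
      intro l hl hn
      have := hpure l hl
      simp only [Bool.and_eq_true, Bool.not_eq_true', not_and, hn, true_implies] at this
      simpa using this
    have hBC : ¬((∃ l ∈ pvLines raw_text, pvIsNoSig l = true) ∨
        2 ≤ (pvLines raw_text).countP (fun l => pvIsHdr l)) := fun h => hd ⟨hA, h⟩
    rw [not_or, not_exists] at hBC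
    · obtain ⟨hB, hC⟩ := hBC
      have hns : (pvLines raw_text).any (fun l => pvIsNoSig l) = false := by
        rw [List.any_eq_false]
        intro l hl
        have := hB l
        simp only [not_and] at this
        intro hx
        by_cases hmem : l ∈ pvLines raw_text
        · exact this hmem hx
        · exact hmem hl
      rw [pvLoopA_main _ max_hits _ hns (by omega), if_neg (by rw [hns]; simp)]

theorem summarize_remote_py_changed : Claim_changed_summarize_remote_py := by
  unfold Claim_changed_summarize_remote_py; decide

-- ----- tightness: A ≠ B everywhere inside D_ -----

-- pieces produced by splitting on a single character never contain that character
theorem pvGo_nl (c : Char) : ∀ (fuel : Nat) (l cur : List Char) (acc : List (List Char)),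
    l.length < fuel → (∀ p ∈ acc, c ∉ p) → c ∉ cur →
    ∀ p ∈ PySem.Chars.splitOn.go [c] fuel l cur acc, c ∉ p := by
  intro fuel
  induction fuel with
  | zero => intro l cur acc h; omega
  | succ n ih =>
    intro l cur acc hlen hacc hcur
    cases l with
    | nil =>
      intro p hp
      simp only [PySem.Chars.splitOn.go, List.mem_reverse, List.mem_cons] at hp
      rcases hp with hp | hp
      · subst hp; simpa using hcur
      · exact hacc p hp
    | cons ch rest =>
      intro p hp
      by_cases hpre : [c].isPrefixOf (ch :: rest) = true
      · simp only [PySem.Chars.splitOn.go, hpre, if_true] at hp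
        have : c ∉ ([] : List Char) := by simp
        refine ih rest [] (cur.reverse :: acc) (by simp at hlen ⊢; omega) ?_ this p ?_
        · intro q hq
          rcases List.mem_cons.mp hq with hq | hq
          · subst hq; simpa using hcur
          · exact hacc q hq
        · simpa using hp
      · have hne : ch ≠ c := by
          intro h; subst h
          simp [List.isPrefixOf] at hpre
        simp only [PySem.Chars.splitOn.go, hpre] at hp
        exact ih rest (ch :: cur) acc (by simp at hlen ⊢; omega) hacc
          (by simp [List.mem_cons]; exact ⟨fun h => hne h.symm, hcur⟩) p hp

theorem pvLines_nl (s : String) : ∀ l ∈ pvLines s, '\n' ∉ l.toList := by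
  intro l hl
  simp only [pvLines, PySem.Str.split?, PySem.Chars.split?] at hl
  simp only [show ("\n".toList) = ['\n'] from rfl] at hl
  simp only [List.isEmpty_cons, if_false, Option.map_some, Option.getD_some, Bool.false_eq_true,
    List.mem_map] at hl
  obtain ⟨p, hp, rfl⟩ := hl
  rw [String.toList_ofList]
  exact pvGo_nl '\n' (s.toList.length + 1) s.toList [] [] (by omega) (by simp) (by simp) p hp

theorem pvRstrip_prefix (cs : List Char) : PySem.Chars.rstrip cs <+: cs := by
  have h := List.dropWhile_suffix (l := cs.reverse) PySem.Chars.isspace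
  have := List.reverse_prefix.mpr h
  simpa [PySem.Chars.rstrip] using this

theorem pvTrunc_toList (l : String) :
    (pvTrunc l).toList = (PySem.Chars.rstrip l.toList).take 200 := by
  simp only [pvTrunc, PySem.Str.toList_slice, PySem.Chars.slice_eq_listSlice,
    PySem.Str.toList_rstrip]
  rw [PySem.List.slice_to _ (by omega : (0:Int) ≤ 200)]
  rfl

theorem pvTrunc_prefix (l : String) : (pvTrunc l).toList <+: l.toList := by
  rw [pvTrunc_toList]
  exact (List.take_prefix _ _).trans (pvRstrip_prefix _)

theorem pvTrunc_nl (l : String) (h : '\n' ∉ l.toList) : '\n' ∉ (pvTrunc l).toList := by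
  intro hx
  exact h ((pvTrunc_prefix l).subset hx)

theorem pvRstrip_ne_nil (cs : List Char) (h : PySem.Chars.strip cs ≠ []) :
    PySem.Chars.rstrip cs ≠ [] := by
  intro h0
  apply h
  have hall : ∀ x ∈ cs, PySem.Chars.isspace x = true := by
    have : List.dropWhile PySem.Chars.isspace cs.reverse = [] := by
      have := congrArg List.reverse h0
      simpa [PySem.Chars.rstrip] using this
    rw [List.dropWhile_eq_nil_iff] at this
    intro x hx
    exact this x (List.mem_reverse.mpr hx)
  have hl : PySem.Chars.lstrip cs = [] := by
    simp only [PySem.Chars.lstrip, List.dropWhile_eq_nil_iff]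
    exact hall
  simp [PySem.Chars.strip, hl, PySem.Chars.rstrip]

theorem pvTrunc_head (l : String) (h : PySem.Chars.rstrip l.toList ≠ []) :
    (pvTrunc l).toList.head? = l.toList.head? := by
  obtain ⟨a, t, ha⟩ : ∃ a t, PySem.Chars.rstrip l.toList = a :: t := by
    cases hx : PySem.Chars.rstrip l.toList with
    | nil => exact absurd hx h
    | cons a t => exact ⟨a, t, rfl⟩
  have hpre := pvRstrip_prefix l.toList
  rw [ha] at hpre
  obtain ⟨u, hu⟩ := hpre
  rw [pvTrunc_toList, ha, ← hu, show (200:Nat) = 199 + 1 from rfl, List.take_succ_cons]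
  rfl

theorem pvHit_ne_banner (l : String) (hs : (PySem.Str.strip l == "") = false)
    (hw : (PySem.Str.startswith l ">" || PySem.Str.startswith l " ") = true) :
    (pvTrunc l == pvBanner) = false := by
  have hstrip : PySem.Chars.strip l.toList ≠ [] := by
    intro h0
    have : PySem.Str.strip l = "" := by
      simp [PySem.Str.strip, h0]
    rw [this] at hs
    simp at hs
  have hr := pvRstrip_ne_nil l.toList hstrip
  have hhead : (pvTrunc l).toList.head? = l.toList.head? := pvTrunc_head l hr
  have hfirst : l.toList.head? = some '>' ∨ l.toList.head? = some ' ' := by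
    rcases Bool.or_eq_true .. |>.mp hw with h | h
    · left
      have := (PySem.Chars.startswith_iff _ _).mp h
      obtain ⟨u, hu⟩ := this
      rw [← hu]; rfl
    · right
      have := (PySem.Chars.startswith_iff _ _).mp h
      obtain ⟨u, hu⟩ := this
      rw [← hu]; rfl
  rw [Bool.eq_false_iff]
  intro hbeq
  have heq : pvTrunc l = pvBanner := eq_of_beq hbeq
  have : (pvTrunc l).toList.head? = some '=' := by rw [heq]; rfl
  rw [hhead] at this
  rcases hfirst with h | h <;> rw [h] at this <;> simp at this

-- the banner contains no newline
theorem pvBanner_nl : '\n' ∉ pvBanner.toList := by decide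

-- A's loop, on lines with no pure no-similarity line, yields the raw fallback (no header seen)
-- or a banner-headed join whose banner count is the header count
theorem pvLoopA_shape (al : List String) (mh : Int) :
    ∀ (ls summary : List String) (inDesc : Bool) (hits : Int),
      ls.any (fun l => pvIsNoSig l && !(pvIsHdr l)) = false →
      (∀ l ∈ ls, '\n' ∉ l.toList) →
      (∀ p ∈ summary, '\n' ∉ p.toList) →
      (summary.head? = none ∨ summary.head? = some pvBanner) →
      (inDesc = true → summary ≠ []) →
      (pvLoopA al mh ls summary inDesc hits = pvFallback al ∧ summary = [] ∧
        ls.countP (fun l => pvIsHdr l) = 0) ∨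
      (∃ S, pvLoopA al mh ls summary inDesc hits = PySem.Str.join "\n" S ∧ S ≠ [] ∧
        S.head? = some pvBanner ∧ (∀ p ∈ S, '\n' ∉ p.toList) ∧
        S.countP (fun p => p == pvBanner) =
          summary.countP (fun p => p == pvBanner) + ls.countP (fun l => pvIsHdr l)) := by
  intro ls
  induction ls with
  | nil =>
    intro summary inDesc hits _ _ hsnl hhead _
    cases summary with
    | nil => left; exact ⟨by simp [pvLoopA], rfl, rfl⟩
    | cons a r =>
      right
      refine ⟨a :: r, by simp [pvLoopA], by simp, ?_, hsnl, by simp⟩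
      rcases hhead with h | h
      · simp at h
      · exact h
  | cons l rest ih =>
    intro summary inDesc hits hpure hnl hsnl hhead hne
    simp only [List.any_cons, Bool.or_eq_false_iff] at hpure
    obtain ⟨hp1, hp2⟩ := hpure
    have hnl' : ∀ x ∈ rest, '\n' ∉ x.toList := fun x hx => hnl x (List.mem_cons_of_mem _ hx)
    by_cases hh : pvIsHdr l = true
    · simp only [pvLoopA, hh, if_true]
      have hcase := ih (summary ++ [pvBanner]) true hits hp2 hnl'
        (by intro p hp
            rcases List.mem_append.mp hp with hp | hp
            · exact hsnl p hp
            · simp at hp; subst hp; exact pvBanner_nl)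
        (by rcases hhead with h | h
            · right; cases summary with
              | nil => rfl
              | cons a r => simp at h
            · right; cases summary with
              | nil => rfl
              | cons a r => simpa using h)
        (by intro _; simp)
      rcases hcase with ⟨_, habs, _⟩ | ⟨S, h1, h2, h3, h4, h5⟩
      · exact absurd habs (by simp)
      · right
        refine ⟨S, h1, h2, h3, h4, ?_⟩
        have hb1 : List.countP (fun p => p == pvBanner) [pvBanner] = 1 := by simp
        have hc1 : List.countP (fun x => pvIsHdr x) (l :: rest) =
            List.countP (fun x => pvIsHdr x) rest + 1 := by
          rw [List.countP_cons]; simp [hh]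
        rw [h5, List.countP_append, hb1, hc1]
        omega
    · have hn : pvIsNoSig l = false := by
        rw [Bool.and_eq_false_iff] at hp1
        rcases hp1 with h | h
        · exact h
        · rw [Bool.not_eq_false'] at h; exact absurd h hh
      simp only [pvLoopA, hh, Bool.false_eq_true, if_false, hn]
      have hcnt : (l :: rest).countP (fun x => pvIsHdr x) = rest.countP (fun x => pvIsHdr x) := by
        rw [List.countP_cons]; simp [hh]
      by_cases hc : (inDesc && !(PySem.Str.strip l == "") && decide (hits < mh) &&
          (PySem.Str.startswith l ">" || PySem.Str.startswith l " ")) = true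
      · simp only [hc, if_true]
        have hd : inDesc = true := by
          rcases Bool.and_eq_true .. |>.mp (Bool.and_eq_true .. |>.mp
            (Bool.and_eq_true .. |>.mp hc).1).1 with ⟨h1, _⟩
          exact h1
        have hsne := hne hd
        have hsb : (PySem.Str.strip l == "") = false := by
          have := (Bool.and_eq_true .. |>.mp (Bool.and_eq_true .. |>.mp
            (Bool.and_eq_true .. |>.mp hc).1).1).2
          rwa [Bool.not_eq_true'] at this
        have hws := (Bool.and_eq_true .. |>.mp hc).2
        have hnb := pvHit_ne_banner l hsb hws
        have hcase := ih (summary ++ [pvTrunc l]) inDesc (hits + 1) hp2 hnl'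
          (by intro p hp
              rcases List.mem_append.mp hp with hp | hp
              · exact hsnl p hp
              · simp at hp; subst hp
                exact pvTrunc_nl l (hnl l (List.mem_cons_self ..)))
          (by right
              cases summary with
              | nil => exact absurd rfl hsne
              | cons a r =>
                rcases hhead with h | h
                · simp at h
                · simpa using h)
          (by intro _; simp)
        rcases hcase with ⟨_, habs, _⟩ | ⟨S, h1, h2, h3, h4, h5⟩
        · exact absurd habs (by simp)
        · right
          refine ⟨S, h1, h2, h3, h4, ?_⟩
          rw [h5, List.countP_append, hcnt]
          simp [hnb]
      · simp only [hc, Bool.false_eq_true, if_false]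
        have hcase := ih summary inDesc hits hp2 hnl' hsnl hhead hne
        rcases hcase with ⟨h1, h2, h3⟩ | ⟨S, h1, h2, h3, h4, h5⟩
        · left; exact ⟨h1, h2, by rw [hcnt]; exact h3⟩
        · right; exact ⟨S, h1, h2, h3, h4, by rw [h5, hcnt]⟩

-- every element B's inner loop ever holds is newline-free and is not the banner
theorem pvEmitB_props (mh : Int) :
    ∀ (ls acc : List String),
      (∀ l ∈ ls, '\n' ∉ l.toList) →
      (∀ p ∈ acc, '\n' ∉ p.toList ∧ (p == pvBanner) = false) →
      ∀ p ∈ pvEmitB mh ls acc, '\n' ∉ p.toList ∧ (p == pvBanner) = false := by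
  intro ls
  induction ls with
  | nil => intro acc _ hacc p hp; exact hacc p hp
  | cons l rest ih =>
    intro acc hnl hacc p hp
    have hnl' : ∀ x ∈ rest, '\n' ∉ x.toList := fun x hx => hnl x (List.mem_cons_of_mem _ hx)
    simp only [pvEmitB] at hp
    by_cases hge : decide ((acc.length : Int) ≥ mh) = true
    · rw [if_pos hge] at hp; exact hacc p hp
    · rw [if_neg (by simp_all)] at hp
      by_cases hc : (!(PySem.Str.strip l == "") &&
          (PySem.Str.startswith l ">" || PySem.Str.startswith l " ")) = true
      · rw [if_pos hc] at hp
        refine ih (acc ++ [pvTrunc l]) hnl' ?_ p hp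
        intro q hq
        rcases List.mem_append.mp hq with hq | hq
        · exact hacc q hq
        · simp at hq; subst hq
          have hsb : (PySem.Str.strip l == "") = false := by
            have := (Bool.and_eq_true .. |>.mp hc).1
            rwa [Bool.not_eq_true'] at this
          exact ⟨pvTrunc_nl l (hnl l (List.mem_cons_self ..)),
            pvHit_ne_banner l hsb (Bool.and_eq_true .. |>.mp hc).2⟩
      · rw [if_neg hc] at hp
        exact ih acc hnl' hacc p hp

-- the first header line exists when the header count is positive, and what follows is a sub-collection
theorem pvFindHdr_mem : ∀ ls : List String, (∃ l ∈ ls, pvIsHdr l = true) →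
    ∃ rest, pvFindHdr ls = some rest ∧ ∀ x ∈ rest, x ∈ ls := by
  intro ls
  induction ls with
  | nil => intro h; simp at h
  | cons l rest ih =>
    intro h
    by_cases hh : pvIsHdr l = true
    · exact ⟨rest, by simp [pvFindHdr, hh], fun x hx => List.mem_cons_of_mem _ hx⟩
    · obtain ⟨x, hx1, hx2⟩ := h
      rcases List.mem_cons.mp hx1 with hx | hx
      · subst hx; exact absurd hx2 hh
      · obtain ⟨r, hr1, hr2⟩ := ih ⟨x, hx, hx2⟩
        exact ⟨r, by simp [pvFindHdr, hh, hr1], fun y hy => List.mem_cons_of_mem _ (hr2 y hy)⟩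

-- joining newline-free pieces with a newline is injective
theorem pvJoin_inj (S T : List String) (hS : S ≠ []) (hT : T ≠ [])
    (hSn : ∀ p ∈ S, '\n' ∉ p.toList) (hTn : ∀ p ∈ T, '\n' ∉ p.toList)
    (h : PySem.Str.join "\n" S = PySem.Str.join "\n" T) : S = T := by
  have h1 := congrArg String.toList h
  rw [PySem.Str.toList_join, PySem.Str.toList_join] at h1
  simp only [PySem.Chars.join, show ("\n".toList) = ['\n'] from rfl] at h1
  have h2 := congrArg (List.splitOn '\n') h1
  rw [List.splitOn_intercalate _ _ (by
        intro p hp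
        obtain ⟨q, hq, rfl⟩ := List.mem_map.mp hp
        exact hSn q hq) (by simpa using hS),
      List.splitOn_intercalate _ _ (by
        intro p hp
        obtain ⟨q, hq, rfl⟩ := List.mem_map.mp hp
        exact hTn q hq) (by simpa using hT)] at h2
  exact List.map_injective_iff.mpr (fun a b hab => String.toList_inj.mp hab) h2

-- a banner-headed join is never the no-similarity message
theorem pvJoin_banner_ne_msg (r : List String) :
    PySem.Str.join "\n" (pvBanner :: r) ≠ pvMsg := by
  intro h
  have h1 := congrArg String.toList h
  rw [PySem.Str.toList_join] at h1
  have hpre : pvBanner.toList <+: pvMsg.toList := by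
    rw [← h1]
    cases r with
    | nil => simp [PySem.Chars.join, List.intercalate]
    | cons q rest =>
      rw [List.map_cons, List.map_cons, PySem.Chars.join_cons_cons, List.append_assoc]
      exact List.prefix_append _ _
  rw [List.prefix_iff_eq_take] at hpre
  revert hpre
  decide

theorem summarize_remote_py_tight : Claim_exact_summarize_remote_py := by
  intro raw_text max_hits _ hD
  obtain ⟨hAll, hDisj⟩ := hD
  simp only [summarize_remote_py, summarize_remote_py_alt]
  have hpure : (pvLines raw_text).any (fun l => pvIsNoSig l && !(pvIsHdr l)) = false := by
    rw [List.any_eq_false]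
    intro l hl
    simp only [Bool.and_eq_true, Bool.not_eq_true', not_and]
    intro hn
    rw [hAll l hl hn]
    simp
  have hnl := pvLines_nl raw_text
  have hshape := pvLoopA_shape (pvLines raw_text) max_hits (pvLines raw_text) [] false 0
    hpure hnl (by simp) (Or.inl rfl) (by simp)
  by_cases hns : ((pvLines raw_text).any (fun l => pvIsNoSig l)) = true
  · rw [if_pos hns]
    obtain ⟨w, hw1, hw2⟩ := List.any_eq_true.mp hns
    have hcnt1 : 0 < (pvLines raw_text).countP (fun l => pvIsHdr l) := by
      rw [List.countP_pos_iff]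
      exact ⟨w, hw1, hAll w hw1 hw2⟩
    rcases hshape with ⟨_, _, hc0⟩ | ⟨S, hA, hSne, hhead, _, _⟩
    · omega
    · rw [hA]
      obtain ⟨S', rfl⟩ : ∃ S', S = pvBanner :: S' := by
        cases S with
        | nil => exact absurd rfl hSne
        | cons a r =>
          simp only [List.head?_cons, Option.some.injEq] at hhead
          exact ⟨r, by rw [hhead]⟩
      exact pvJoin_banner_ne_msg S'
  · rw [if_neg hns]
    have hcnt2 : 2 ≤ (pvLines raw_text).countP (fun l => pvIsHdr l) := by
      rcases hDisj with h | h
      · obtain ⟨x, hx1, hx2⟩ := h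
        exact absurd (List.any_eq_true.mpr ⟨x, hx1, hx2⟩) hns
      · exact h
    have hex : ∃ l ∈ pvLines raw_text, pvIsHdr l = true := by
      by_contra hno
      have h0 : (pvLines raw_text).countP (fun l => pvIsHdr l) = 0 :=
        List.countP_eq_zero.mpr (fun a ha hx => hno ⟨a, ha, hx⟩)
      omega
    obtain ⟨rest, hfind, hsub⟩ := pvFindHdr_mem _ hex
    rw [hfind]
    rcases hshape with ⟨_, _, hc0⟩ | ⟨S, hA, hSne, hhead, hSnl, hScnt⟩
    · omega
    · rw [hA]
      intro h
      have hE := pvEmitB_props max_hits rest []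
        (fun l hl => hnl l (hsub l hl)) (by simp)
      have hST := pvJoin_inj S (pvBanner :: pvEmitB max_hits rest []) hSne (by simp) hSnl
        (by intro p hp
            rcases List.mem_cons.mp hp with hp | hp
            · subst hp; exact pvBanner_nl
            · exact (hE p hp).1) h
      have hTcnt : (pvBanner :: pvEmitB max_hits rest []).countP (fun p => p == pvBanner) = 1 := by
        rw [List.countP_cons, List.countP_eq_zero.mpr (fun p hp => by simp [(hE p hp).2])]
        simp
      rw [hST, hTcnt] at hScnt
      simp at hScnt
      omega
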